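-- pv_equiv track=rewrite | github.com/andypymont/adventofcode | 2018/day18.py | calculate_simulation_cycle
-- ===== SOURCE A (Python) =====
-- from typing import Dict, Optional, Tuple
--
-- OPEN = '.'
--
-- TREES = '|'
--
-- LUMBERYARD = '#'
--
-- AdjacencyMap = Dict[int, Tuple[int, ...]]
--
-- Cycle = Tuple[int, int]
--
-- def new_char(area: str, pos: int, adj_map: AdjacencyMap) -> str:
--     adj_trees = 0
--     adj_lumberyards = 0
--
--     for adj in adj_map[pos]:
--         if area[adj] == TREES:
--             adj_trees += 1
--         elif area[adj] == LUMBERYARD: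
--             adj_lumberyards += 1
--
--     char = area[pos]
--
--     if char == OPEN:
--         return TREES if adj_trees >= 3 else OPEN
--     if char == TREES:
--         return LUMBERYARD if adj_lumberyards >= 3 else TREES
--
--     return LUMBERYARD if adj_trees > 0 and adj_lumberyards > 0 else OPEN
--
-- def next_state(state: str, adj_map: AdjacencyMap) -> str:
--     return ''.join(new_char(state, pos, adj_map) for pos in range(len(state)))
--
-- def calculate_simulation_cycle(state: str, adj_map: AdjacencyMap) -> Cycle:
--     minute = 0
--
--     cache = {}
--     cache[state] = minute
--
--     while True:
--         minute += 1
--         state = next_state(state, adj_map)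
--         if state in cache:
--             return (cache[state], minute)
--         cache[state] = minute
-- ===== SOURCE B (Python) =====
-- OPEN = '.'
--
-- TREES = '|'
--
-- LUMBERYARD = '#'
--
-- def new_char(area, pos, adj_map):
--     adj_trees = 0
--     adj_lumberyards = 0
--
--     for adj in adj_map[pos]:
--         if area[adj] == TREES:
--             adj_trees += 1
--         elif area[adj] == LUMBERYARD:
--             adj_lumberyards += 1
--
--     char = area[pos]
--
--     if char == OPEN:
--         return TREES if adj_trees >= 3 else OPEN
--     if char == TREES:
--         return LUMBERYARD if adj_lumberyards >= 3 else TREES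
--
--     return LUMBERYARD if adj_trees > 0 and adj_lumberyards > 0 else OPEN
--
-- def next_state(state, adj_map):
--     return ''.join(new_char(state, pos, adj_map) for pos in range(len(state)))
--
-- def calculate_simulation_cycle(state, adj_map):
--     # Floyd's tortoise-and-hare cycle detection: no cache of visited states.
--     slow = next_state(state, adj_map)
--     fast = next_state(slow, adj_map)
--     while slow != fast:
--         slow = next_state(slow, adj_map)
--         fast = next_state(next_state(fast, adj_map), adj_map)
--
--     # phase 2: find mu, the minute of the first state that later recurs
--     mu = 0
--     tortoise = state
--     while tortoise != slow:
--         tortoise = next_state(tortoise, adj_map)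
--         slow = next_state(slow, adj_map)
--         mu += 1
--
--     # phase 3: find lam, the cycle length
--     lam = 1
--     probe = next_state(tortoise, adj_map)
--     while probe != tortoise:
--         probe = next_state(probe, adj_map)
--         lam += 1
--
--     return (mu, mu + lam)
-- ===== Notes on version B (the rewrite author's own statement) =====
-- stated objective: alternative
-- what changed: Replaced the dict cache of all visited states with Floyd's tortoise-and-hare cycle detection: phase 1 meets slow/fast pointers, phase 2 recovers the first-occurrence minute mu, phase 3 measures the cycle length lam, returning (mu, mu+lam); O(1) states kept instead of a dict of the whole trajectory.
import Mathlib
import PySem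

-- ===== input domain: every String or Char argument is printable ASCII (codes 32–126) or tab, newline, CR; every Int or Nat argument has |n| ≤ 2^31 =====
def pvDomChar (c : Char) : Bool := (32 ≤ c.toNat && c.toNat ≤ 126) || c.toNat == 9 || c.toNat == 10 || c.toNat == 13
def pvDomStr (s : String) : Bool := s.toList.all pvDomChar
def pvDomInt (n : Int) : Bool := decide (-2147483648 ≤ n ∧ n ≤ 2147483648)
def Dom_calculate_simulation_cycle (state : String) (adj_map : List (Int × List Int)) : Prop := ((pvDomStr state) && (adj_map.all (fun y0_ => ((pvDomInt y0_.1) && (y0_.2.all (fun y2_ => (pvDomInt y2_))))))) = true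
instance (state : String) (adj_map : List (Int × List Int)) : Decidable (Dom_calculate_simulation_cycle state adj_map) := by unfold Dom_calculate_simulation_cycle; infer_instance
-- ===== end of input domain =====

-- B replaces A's dict cache of every visited state by Floyd's tortoise-and-hare cycle
-- detection (objective: alternative — O(1) states kept instead of the whole trajectory).

-- ===== PORT A =====

-- 'for adj in adj_map[pos]: …' counting loop of new_char (area[adj] may raise IndexError → none)
def countAdj (area : String) : List Int → Int → Int → Option (Int × Int)
  | [], adj_trees, adj_lumberyards => some (adj_trees, adj_lumberyards)
  | adj :: rest, adj_trees, adj_lumberyards =>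
    match PySem.Str.pyGet? area adj with
    | none => none
    | some c =>
      if c = '|' then countAdj area rest (adj_trees + 1) adj_lumberyards
      else if c = '#' then countAdj area rest adj_trees (adj_lumberyards + 1)
      else countAdj area rest adj_trees adj_lumberyards

def new_char (area : String) (pos : Int) (adj_map : List (Int × List Int)) : Option Char :=
  match PySem.Dict.get? (PySem.Dict.mk adj_map) pos with
  | none => none   -- KeyError
  | some adjs =>
    match countAdj area adjs 0 0 with
    | none => none
    | some (adj_trees, adj_lumberyards) =>
      match PySem.Str.pyGet? area pos with
      | none => none
      | some ch =>
        if ch = '.' then some (if 3 ≤ adj_trees then '|' else '.')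
        else if ch = '|' then some (if 3 ≤ adj_lumberyards then '#' else '|')
        else some (if 0 < adj_trees ∧ 0 < adj_lumberyards then '#' else '.')

def next_state (state : String) (adj_map : List (Int × List Int)) : Option String :=
  ((PySem.List.pyRange 0 (PySem.Str.len state) 1).foldl
    (fun acc pos =>
      match acc, new_char state pos adj_map with
      | some l, some c => some (l ++ [c])
      | _, _ => none) (some ([] : List Char))).map (fun l => String.ofList l)

-- the 'while True' loop of A (fuel is only a totality guard; the default is never reached under Pre_)
def cache_loop (adj_map : List (Int × List Int)) :
    Nat → String → PySem.Dict String Int → Int → Int × Int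
  | 0, _, _, _ => (0, 0)
  | fuel + 1, state, cache, minute =>
    match next_state state adj_map with
    | none => (0, 0)
    | some s =>
      match PySem.Dict.get? cache s with
      | some first => (first, minute + 1)
      | none => cache_loop adj_map fuel s (cache.insert s (minute + 1)) (minute + 1)

def calculate_simulation_cycle (state : String) (adj_map : List (Int × List Int)) : Int × Int :=
  cache_loop adj_map (3 ^ state.toList.length + 2) state (PySem.Dict.empty.insert state 0) 0

-- ===== PORT B =====

-- B's new_char / next_state are the same helpers as A's (unchanged in Source B)
def countAdj_alt (area : String) : List Int → Int → Int → Option (Int × Int)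
  | [], adj_trees, adj_lumberyards => some (adj_trees, adj_lumberyards)
  | adj :: rest, adj_trees, adj_lumberyards =>
    match PySem.Str.pyGet? area adj with
    | none => none
    | some c =>
      if c = '|' then countAdj_alt area rest (adj_trees + 1) adj_lumberyards
      else if c = '#' then countAdj_alt area rest adj_trees (adj_lumberyards + 1)
      else countAdj_alt area rest adj_trees adj_lumberyards

def new_char_alt (area : String) (pos : Int) (adj_map : List (Int × List Int)) : Option Char :=
  match PySem.Dict.get? (PySem.Dict.mk adj_map) pos with
  | none => none
  | some adjs =>
    match countAdj_alt area adjs 0 0 with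
    | none => none
    | some (adj_trees, adj_lumberyards) =>
      match PySem.Str.pyGet? area pos with
      | none => none
      | some ch =>
        if ch = '.' then some (if 3 ≤ adj_trees then '|' else '.')
        else if ch = '|' then some (if 3 ≤ adj_lumberyards then '#' else '|')
        else some (if 0 < adj_trees ∧ 0 < adj_lumberyards then '#' else '.')

def next_state_alt (state : String) (adj_map : List (Int × List Int)) : Option String :=
  ((PySem.List.pyRange 0 (PySem.Str.len state) 1).foldl
    (fun acc pos =>
      match acc, new_char_alt state pos adj_map with
      | some l, some c => some (l ++ [c])
      | _, _ => none) (some ([] : List Char))).map (fun l => String.ofList l)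

-- phase 1: 'while slow != fast' (fuel = totality guard, none never reached under Pre_)
def floyd_meet (adj_map : List (Int × List Int)) :
    Nat → String → String → Option String
  | 0, _, _ => none
  | fuel + 1, slow, fast =>
    if slow = fast then some slow
    else
      match next_state_alt slow adj_map with
      | none => none
      | some slow' =>
        match next_state_alt fast adj_map with
        | none => none
        | some fmid =>
          match next_state_alt fmid adj_map with
          | none => none
          | some fast' => floyd_meet adj_map fuel slow' fast'

-- phase 2: 'while tortoise != slow'
def floyd_mu (adj_map : List (Int × List Int)) :
    Nat → String → String → Int → Option (String × Int)
  | 0, _, _, _ => none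
  | fuel + 1, tortoise, slow, mu =>
    if tortoise = slow then some (tortoise, mu)
    else
      match next_state_alt tortoise adj_map with
      | none => none
      | some tortoise' =>
        match next_state_alt slow adj_map with
        | none => none
        | some slow' => floyd_mu adj_map fuel tortoise' slow' (mu + 1)

-- phase 3: 'while probe != tortoise'
def floyd_lam (adj_map : List (Int × List Int)) (tortoise : String) :
    Nat → String → Int → Option Int
  | 0, _, _ => none
  | fuel + 1, probe, lam =>
    if probe = tortoise then some lam
    else
      match next_state_alt probe adj_map with
      | none => none
      | some probe' => floyd_lam adj_map tortoise fuel probe' (lam + 1)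

def calculate_simulation_cycle_alt (state : String) (adj_map : List (Int × List Int)) : Int × Int :=
  match next_state_alt state adj_map with
  | none => (0, 0)
  | some s1 =>
    match next_state_alt s1 adj_map with
    | none => (0, 0)
    | some s2 =>
      match floyd_meet adj_map (3 ^ state.toList.length + 2) s1 s2 with
      | none => (0, 0)
      | some meet =>
        match floyd_mu adj_map (3 ^ state.toList.length + 2) state meet 0 with
        | none => (0, 0)
        | some (tortoise, mu) =>
          match next_state_alt tortoise adj_map with
          | none => (0, 0)
          | some p1 =>
            match floyd_lam adj_map tortoise (3 ^ state.toList.length + 2) p1 1 with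
            | none => (0, 0)
            | some lam => (mu, mu + lam)

-- ===== PRECONDITION & SPEC =====

-- Pre_ excludes exactly the inputs on which A raises: a position of the grid missing from
-- adj_map (KeyError) or an adjacency index outside Python range [-len, len) (IndexError).
def Pre_calculate_simulation_cycle (state : String) (adj_map : List (Int × List Int)) : Prop :=
  ∀ pos : Nat, pos < state.toList.length →
    (PySem.Dict.get? (PySem.Dict.mk adj_map) (pos : Int)).isSome = true ∧
    ∀ adj ∈ (PySem.Dict.get? (PySem.Dict.mk adj_map) (pos : Int)).getD [],
      -(state.toList.length : Int) ≤ adj ∧ adj < (state.toList.length : Int)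

instance (state : String) (adj_map : List (Int × List Int)) :
    Decidable (Pre_calculate_simulation_cycle state adj_map) := by
  unfold Pre_calculate_simulation_cycle; infer_instance

def pvWitness_calculate_simulation_cycle : String × (List (Int × List Int)) := (".", [(0, [])])

def Spec_calculate_simulation_cycle (state : String) (adj_map : List (Int × List Int)) (out : Int × Int) : Prop := out = calculate_simulation_cycle_alt state adj_map
instance (state : String) (adj_map : List (Int × List Int)) (out : Int × Int) : Decidable (Spec_calculate_simulation_cycle state adj_map out) := by unfold Spec_calculate_simulation_cycle; infer_instance

-- ===== CLAIM (what is proved, stated in full; the proofs are below) =====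
def Claim_equal_calculate_simulation_cycle : Prop := ∀ (state : String) (adj_map : List (Int × List Int)), Dom_calculate_simulation_cycle state adj_map → Pre_calculate_simulation_cycle state adj_map → Spec_calculate_simulation_cycle state adj_map (calculate_simulation_cycle state adj_map)

-- ===== LEMMAS AND PROOFS =====

-- the trajectory of the simulation, as iterates of a total step function f
def iterSeq (f : String → String) (x0 : String) : Nat → String
  | 0 => x0
  | k + 1 => f (iterSeq f x0 k)

-- the cache A has built after visiting minutes 0..k
def cacheOf (f : String → String) (x0 : String) : Nat → PySem.Dict String Int
  | 0 => PySem.Dict.empty.insert x0 0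
  | k + 1 => (cacheOf f x0 k).insert (iterSeq f x0 (k + 1)) ((k + 1 : Nat) : Int)

-- base-3 code of a state over the alphabet {'.', '|', '#'} (for the pigeonhole bound)
def stateCode : List Char → Nat
  | [] => 0
  | c :: rest => 3 * stateCode rest + (if c = '|' then 1 else if c = '#' then 2 else 0)

theorem countAdj_alt_eq (area : String) (l : List Int) (t u : Int) :
    countAdj_alt area l t u = countAdj area l t u := by
  induction l generalizing t u with
  | nil => rfl
  | cons a rest ih =>
    simp only [countAdj_alt, countAdj]
    cases PySem.Str.pyGet? area a with
    | none => rfl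
    | some c => dsimp only; split_ifs <;> apply ih

theorem next_state_alt_eq (s : String) (adj_map : List (Int × List Int)) :
    next_state_alt s adj_map = next_state s adj_map := by
  simp only [next_state_alt, next_state, new_char_alt, new_char, countAdj_alt_eq]

-- countAdj returns a value when every adjacency index is in Python range
theorem countAdj_isSome (area : String) (l : List Int) (t u : Int)
    (h : ∀ adj ∈ l, PySem.Str.pyGet? area adj ≠ none) :
    (countAdj area l t u).isSome = true := by
  induction l generalizing t u with
  | nil => rfl
  | cons a rest ih =>
    simp only [countAdj]
    cases hc : PySem.Str.pyGet? area a with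
    | none => exact absurd hc (h a (by simp))
    | some c =>
      dsimp only; split_ifs <;> exact ih _ _ (fun adj hm => h adj (by simp [hm]))

-- the Option-threading foldl of next_state succeeds when every position yields a character
theorem fold_chars (area : String) (adj_map : List (Int × List Int)) :
    ∀ (l : List Int) (acc : List Char),
      (∀ p ∈ l, ∃ c, new_char area p adj_map = some c ∧ (c = '.' ∨ c = '|' ∨ c = '#')) →
      ∃ cs, List.foldl
          (fun acc pos =>
            match acc, new_char area pos adj_map with
            | some l, some c => some (l ++ [c])
            | _, _ => none) (some acc) l = some (acc ++ cs) ∧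
        cs.length = l.length ∧ ∀ c ∈ cs, c = '.' ∨ c = '|' ∨ c = '#' := by
  intro l
  induction l with
  | nil => exact fun acc _ => ⟨[], by simp, by simp, by simp⟩
  | cons p rest ih =>
    intro acc h
    obtain ⟨c, hc, hca⟩ := h p (by simp)
    obtain ⟨cs, h1, h2, h3⟩ := ih (acc ++ [c]) (fun q hq => h q (by simp [hq]))
    refine ⟨c :: cs, ?_, by simp [h2], ?_⟩
    · simp only [List.foldl_cons, hc]
      rw [h1]
      simp
    · intro d hd
      rcases List.mem_cons.mp hd with h | h
      · subst h; exact hca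
      · exact h3 d h

-- new_char returns one of the three alphabet characters on every valid position
theorem new_char_some (state : String) (adj_map : List (Int × List Int))
    (hPre : Pre_calculate_simulation_cycle state adj_map)
    (area : String) (hlen : area.toList.length = state.toList.length)
    (pos : Int) (h0 : 0 ≤ pos) (hlt : pos < (state.toList.length : Int)) :
    ∃ c, new_char area pos adj_map = some c ∧ (c = '.' ∨ c = '|' ∨ c = '#') := by
  have hpos : pos = ((pos.toNat : Nat) : Int) := by omega
  rw [hpos]
  obtain ⟨hkey, hadj⟩ := hPre pos.toNat (by omega)
  obtain ⟨adjs, hadjs⟩ := Option.isSome_iff_exists.mp hkey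
  rw [hadjs] at hadj
  simp only [Option.getD_some] at hadj
  simp only [new_char]
  rw [hadjs]
  dsimp only
  have hcs : (countAdj area adjs 0 0).isSome = true := by
    apply countAdj_isSome
    intro adj hm
    have hb := hadj adj hm
    simp only [PySem.Str.pyGet?, PySem.Chars.pyGet?, Ne, PySem.List.pyGet?_eq_none_iff, PySem.Raise.InRange, hlen]
    omega
  obtain ⟨tu, hcount⟩ := Option.isSome_iff_exists.mp hcs
  obtain ⟨t, u⟩ := tu
  rw [hcount]
  dsimp only
  have hchs : (PySem.Str.pyGet? area ((pos.toNat : Nat) : Int)).isSome = true := by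
    rw [← Option.ne_none_iff_isSome]
    simp only [PySem.Str.pyGet?, PySem.Chars.pyGet?, Ne, PySem.List.pyGet?_eq_none_iff, PySem.Raise.InRange, hlen]
    omega
  obtain ⟨ch, hch⟩ := Option.isSome_iff_exists.mp hchs
  rw [hch]
  dsimp only
  split_ifs <;> exact ⟨_, rfl, by simp⟩

-- next_state is total on strings of the right length; output has that length, alphabet chars
theorem next_state_some (state : String) (adj_map : List (Int × List Int))
    (hPre : Pre_calculate_simulation_cycle state adj_map)
    (area : String) (hlen : area.toList.length = state.toList.length) :
    ∃ s', next_state area adj_map = some s' ∧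
      s'.toList.length = state.toList.length ∧
      ∀ c ∈ s'.toList, c = '.' ∨ c = '|' ∨ c = '#' := by
  simp only [next_state]
  rw [PySem.Str.len_eq, hlen, PySem.List.pyRange_zero_natCast]
  have hmem : ∀ p ∈ (List.range state.toList.length).map (fun k : Nat => (k : Int)),
      ∃ c, new_char area p adj_map = some c ∧ (c = '.' ∨ c = '|' ∨ c = '#') := by
    intro p hp
    simp only [List.mem_map, List.mem_range] at hp
    obtain ⟨j, hj, rfl⟩ := hp
    exact new_char_some state adj_map hPre area hlen _ (Int.natCast_nonneg j) (by exact_mod_cast hj)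
  obtain ⟨cs, h1, h2, h3⟩ := fold_chars area adj_map _ [] hmem
  refine ⟨String.ofList cs, ?_, ?_, ?_⟩
  · rw [h1]
    simp
  · simp only [List.length_map, List.length_range] at h2
    simpa using h2
  · simpa using h3

theorem stateCode_lt (l : List Char) : stateCode l < 3 ^ l.length := by
  induction l with
  | nil => simp [stateCode]
  | cons c rest ih =>
    simp only [stateCode, List.length_cons, pow_succ]
    split_ifs <;> omega

theorem stateCode_inj (l1 l2 : List Char) (hlen : l1.length = l2.length)
    (h1 : ∀ c ∈ l1, c = '.' ∨ c = '|' ∨ c = '#')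
    (h2 : ∀ c ∈ l2, c = '.' ∨ c = '|' ∨ c = '#')
    (hc : stateCode l1 = stateCode l2) : l1 = l2 := by
  induction l1 generalizing l2 with
  | nil => cases l2 with
    | nil => rfl
    | cons c2 r2 => simp at hlen
  | cons c1 r1 ih =>
    cases l2 with
    | nil => simp at hlen
    | cons c2 r2 =>
      have ha := h1 c1 (by simp)
      have hb := h2 c2 (by simp)
      have hr : r1.length = r2.length := by simpa using hlen
      have hcode1 := stateCode_lt r1
      have hcode2 := stateCode_lt r2
      simp only [stateCode] at hc
      rcases ha with h | h | h <;> rcases hb with h' | h' | h' <;> subst h <;> subst h' <;>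
        (try simp at hc) <;>
        first
          | omega
          | (have hcd : stateCode r1 = stateCode r2 := by omega
             have hrec := ih r2 hr (fun c hcm => h1 c (List.mem_cons_of_mem _ hcm))
               (fun c hcm => h2 c (List.mem_cons_of_mem _ hcm)) hcd
             rw [hrec])

-- period r - mu, from minute mu on
theorem iter_per (f : String → String) (x0 : String) (r mu : Nat) (hmur : mu < r)
    (heq : iterSeq f x0 mu = iterSeq f x0 r) :
    ∀ k, mu ≤ k → iterSeq f x0 (k + (r - mu)) = iterSeq f x0 k := by
  intro k hk
  induction k, hk using Nat.le_induction with
  | base =>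
    have h1 : mu + (r - mu) = r := by omega
    rw [h1]; exact heq.symm
  | succ k hk ih =>
    have h1 : k + 1 + (r - mu) = (k + (r - mu)) + 1 := by omega
    rw [h1]
    show f (iterSeq f x0 (k + (r - mu))) = f (iterSeq f x0 k)
    rw [ih]

theorem iter_perm (f : String → String) (x0 : String) (r mu : Nat) (hmur : mu < r)
    (heq : iterSeq f x0 mu = iterSeq f x0 r) :
    ∀ m k, mu ≤ k → iterSeq f x0 (k + m * (r - mu)) = iterSeq f x0 k := by
  intro m k hk
  induction m with
  | zero => simp
  | succ m ih =>
    have h1 : k + (m + 1) * (r - mu) = (k + m * (r - mu)) + (r - mu) := by ring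
    rw [h1, iter_per f x0 r mu hmur heq _ (by omega), ih]

theorem iter_reduce (f : String → String) (x0 : String) (r mu : Nat) (hmur : mu < r)
    (heq : iterSeq f x0 mu = iterSeq f x0 r) :
    ∀ b, mu ≤ b → ∃ c, mu ≤ c ∧ c < r ∧ iterSeq f x0 c = iterSeq f x0 b ∧
      c % (r - mu) = b % (r - mu) := by
  intro b
  induction b using Nat.strong_induction_on with
  | _ b ih =>
    intro hb
    by_cases hbr : b < r
    · exact ⟨b, hb, hbr, rfl, rfl⟩
    · have h1 : mu ≤ b - (r - mu) := by omega
      obtain ⟨c, hc1, hc2, hc3, hc4⟩ := ih (b - (r - mu)) (by omega) h1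
      have hper := iter_per f x0 r mu hmur heq (b - (r - mu)) h1
      have h2 : b - (r - mu) + (r - mu) = b := by omega
      rw [h2] at hper
      refine ⟨c, hc1, hc2, hc3.trans hper.symm, ?_⟩
      rw [hc4]
      conv_rhs => rw [← h2]
      rw [Nat.add_mod_right]

-- the key structure lemma: any repeat pair lies in the cycle and spans a multiple of the period
theorem iter_key (f : String → String) (x0 : String) (r mu : Nat) (hmur : mu < r)
    (heq : iterSeq f x0 mu = iterSeq f x0 r)
    (hinj : ∀ i j, i < j → j < r → iterSeq f x0 i ≠ iterSeq f x0 j)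
    (hrmin : ∀ b j, j < b → iterSeq f x0 j = iterSeq f x0 b → r ≤ b) :
    ∀ a b, a < b → iterSeq f x0 a = iterSeq f x0 b → mu ≤ a ∧ (r - mu) ∣ (b - a) := by
  intro a b hab heq2
  have hbr : r ≤ b := hrmin b a hab heq2
  have hmua : mu ≤ a := by
    by_contra hlt
    obtain ⟨c, hc1, hc2, hc3, _⟩ := iter_reduce f x0 r mu hmur heq b (by omega)
    exact hinj a c (by omega) hc2 (heq2.trans hc3.symm)
  obtain ⟨c, hc1, hc2, hc3, hc4⟩ := iter_reduce f x0 r mu hmur heq a hmua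
  obtain ⟨d, hd1, hd2, hd3, hd4⟩ := iter_reduce f x0 r mu hmur heq b (by omega)
  have hcd : c = d := by
    by_contra hne
    have hcd3 : iterSeq f x0 c = iterSeq f x0 d := hc3.trans (heq2.trans hd3.symm)
    rcases Nat.lt_or_ge c d with h | h
    · exact hinj c d h hd2 hcd3
    · exact hinj d c (by omega) hc2 hcd3.symm
  refine ⟨hmua, ?_⟩
  have hmod : a % (r - mu) = b % (r - mu) := by rw [← hc4, ← hd4, hcd]
  exact (Nat.modEq_iff_dvd' (Nat.le_of_lt hab)).mp hmod

-- the tortoise and the hare meet within the first r minutes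
theorem iter_meet_exists (f : String → String) (x0 : String) (r mu : Nat) (hmur : mu < r)
    (heq : iterSeq f x0 mu = iterSeq f x0 r) :
    ∃ t, 1 ≤ t ∧ t ≤ r ∧ iterSeq f x0 t = iterSeq f x0 (2 * t) := by
  by_cases hmu0 : mu = 0
  · refine ⟨r, by omega, le_refl r, ?_⟩
    have := iter_perm f x0 r mu hmur heq 1 r (by omega)
    have hidx : r + 1 * (r - mu) = 2 * r := by omega
    rw [hidx] at this
    exact this.symm
  · -- t = smallest multiple of lam that is ≥ mu
    set lam := r - mu with hlamdef
    set q := (mu + lam - 1) / lam with hq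
    set t := lam * q with ht
    have hdm := Nat.div_add_mod (mu + lam - 1) lam
    have hrem : (mu + lam - 1) % lam < lam := Nat.mod_lt _ (by omega)
    have hdm' : t + (mu + lam - 1) % lam = mu + lam - 1 := by
      rw [ht, hq]; exact hdm
    have hmut : mu ≤ t := by omega
    have htr : t ≤ r := by omega
    refine ⟨t, by omega, htr, ?_⟩
    have := iter_perm f x0 r mu hmur heq q t hmut
    have hidx : t + q * (r - mu) = 2 * t := by
      have : q * (r - mu) = t := by rw [ht]; ring
      omega
    rw [hidx] at this
    exact this.symm

theorem cacheOf_get?_none (f : String → String) (x0 : String) (k : Nat) (t : String)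
    (h : ∀ j ≤ k, iterSeq f x0 j ≠ t) :
    (cacheOf f x0 k).get? t = none := by
  induction k with
  | zero =>
    have hne : t ≠ x0 := fun he => h 0 (le_refl 0) he.symm
    rw [cacheOf, PySem.Dict.get?_insert_of_ne _ _ hne, PySem.Dict.get?_empty]
  | succ k ih =>
    have hne : t ≠ iterSeq f x0 (k + 1) := fun he => h (k + 1) (le_refl _) he.symm
    rw [cacheOf, PySem.Dict.get?_insert_of_ne _ _ hne]
    exact ih (fun j hj => h j (by omega))

theorem cacheOf_get?_found (f : String → String) (x0 : String) (k mu : Nat) (t : String)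
    (hmuk : mu ≤ k) (ht : iterSeq f x0 mu = t)
    (hlo : ∀ j < mu, iterSeq f x0 j ≠ t)
    (hhi : ∀ j, mu < j → j ≤ k → iterSeq f x0 j ≠ t) :
    (cacheOf f x0 k).get? t = some (mu : Int) := by
  induction k with
  | zero =>
    have hmu0 : mu = 0 := by omega
    subst hmu0
    rw [cacheOf, ← ht]
    exact PySem.Dict.get?_insert_self PySem.Dict.empty (iterSeq f x0 0) ((0 : Nat) : Int)
  | succ k ih =>
    by_cases hmu : mu = k + 1
    · subst hmu
      rw [cacheOf, ← ht]
      exact PySem.Dict.get?_insert_self (cacheOf f x0 k) (iterSeq f x0 (k + 1)) (((k + 1 : Nat)) : Int)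
    · have hne : t ≠ iterSeq f x0 (k + 1) := fun he => hhi (k + 1) (by omega) (le_refl _) he.symm
      rw [cacheOf, PySem.Dict.get?_insert_of_ne _ _ hne]
      exact ih (by omega) (fun j hj1 hj2 => hhi j hj1 (by omega))

theorem cache_loop_run (adj_map : List (Int × List Int)) (f : String → String) (x0 : String)
    (r mu : Nat) (hmur : mu < r)
    (hf : ∀ k, next_state (iterSeq f x0 k) adj_map = some (f (iterSeq f x0 k)))
    (heq : iterSeq f x0 mu = iterSeq f x0 r)
    (hinj : ∀ i j, i < j → j < r → iterSeq f x0 i ≠ iterSeq f x0 j)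
    (hlo : ∀ j < mu, iterSeq f x0 j ≠ iterSeq f x0 r) :
    ∀ fuel k, k < r → r ≤ k + fuel →
      cache_loop adj_map fuel (iterSeq f x0 k) (cacheOf f x0 k) (k : Int) =
        ((mu : Int), (r : Int)) := by
  intro fuel
  induction fuel with
  | zero => intro k h1 h2; exact absurd h1 (by omega)
  | succ fuel ih =>
    intro k hkr hrf
    simp only [cache_loop]
    rw [hf k]
    dsimp only
    rw [show f (iterSeq f x0 k) = iterSeq f x0 (k + 1) from rfl]
    by_cases hk1 : k + 1 = r
    · have ht : iterSeq f x0 mu = iterSeq f x0 (k + 1) := by rw [hk1]; exact heq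
      have hfound : (cacheOf f x0 k).get? (iterSeq f x0 (k + 1)) = some (mu : Int) :=
        cacheOf_get?_found f x0 k mu _ (by omega) ht
          (fun j hj hje => hlo j hj (by rw [← hk1]; exact hje))
          (fun j hj1 hj2 hje => by
            have hjr : iterSeq f x0 j = iterSeq f x0 r := by rw [← hk1]; exact hje
            exact hinj mu j hj1 (by omega) (heq.trans hjr.symm))
      rw [hfound]
      dsimp only
      rw [show ((k : Int) + 1) = ((r : Nat) : Int) from by omega]
    · have hnone : (cacheOf f x0 k).get? (iterSeq f x0 (k + 1)) = none :=
        cacheOf_get?_none f x0 k _ (fun j hj hje => hinj j (k + 1) (by omega) (by omega) hje)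
      rw [hnone]
      dsimp only
      rw [show ((k : Int) + 1) = ((k + 1 : Nat) : Int) from by omega]
      exact ih (k + 1) (by omega) (by omega)

theorem floyd_meet_run (adj_map : List (Int × List Int)) (f : String → String) (x0 : String)
    (T : Nat) (_hT1 : 1 ≤ T)
    (hf : ∀ k, next_state_alt (iterSeq f x0 k) adj_map = some (f (iterSeq f x0 k)))
    (hTeq : iterSeq f x0 T = iterSeq f x0 (2 * T))
    (hTmin : ∀ t, 1 ≤ t → t < T → iterSeq f x0 t ≠ iterSeq f x0 (2 * t)) :
    ∀ fuel k, k + 1 ≤ T → T ≤ k + fuel →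
      floyd_meet adj_map fuel (iterSeq f x0 (k + 1)) (iterSeq f x0 (2 * (k + 1))) =
        some (iterSeq f x0 T) := by
  intro fuel
  induction fuel with
  | zero => intro k h1 h2; exact absurd h1 (by omega)
  | succ fuel ih =>
    intro k hk hTf
    simp only [floyd_meet]
    by_cases hkT : k + 1 = T
    · have hcond : iterSeq f x0 (k + 1) = iterSeq f x0 (2 * (k + 1)) := by rw [hkT]; exact hTeq
      rw [if_pos hcond, hkT]
    · have hcond : iterSeq f x0 (k + 1) ≠ iterSeq f x0 (2 * (k + 1)) :=
        hTmin (k + 1) (by omega) (by omega)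
      rw [if_neg hcond, hf (k + 1)]
      dsimp only
      rw [hf (2 * (k + 1))]
      dsimp only
      rw [show f (iterSeq f x0 (2 * (k + 1))) = iterSeq f x0 (2 * (k + 1) + 1) from rfl,
        hf (2 * (k + 1) + 1)]
      dsimp only
      have ihh := ih (k + 1) (by omega) (by omega)
      rw [show 2 * (k + 1 + 1) = (2 * (k + 1) + 1) + 1 from by ring] at ihh
      exact ihh

theorem floyd_mu_run (adj_map : List (Int × List Int)) (f : String → String) (x0 : String)
    (T mu : Nat)
    (hf : ∀ k, next_state_alt (iterSeq f x0 k) adj_map = some (f (iterSeq f x0 k)))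
    (hmuT : iterSeq f x0 (T + mu) = iterSeq f x0 mu)
    (hlt : ∀ k < mu, iterSeq f x0 k ≠ iterSeq f x0 (T + k)) :
    ∀ fuel k, k ≤ mu → mu < k + fuel →
      floyd_mu adj_map fuel (iterSeq f x0 k) (iterSeq f x0 (T + k)) (k : Int) =
        some (iterSeq f x0 mu, (mu : Int)) := by
  intro fuel
  induction fuel with
  | zero => intro k h1 h2; exact absurd h1 (by omega)
  | succ fuel ih =>
    intro k hk hmuf
    simp only [floyd_mu]
    by_cases hkmu : k = mu
    · subst hkmu
      rw [if_pos hmuT.symm]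
    · have hcond : iterSeq f x0 k ≠ iterSeq f x0 (T + k) := hlt k (by omega)
      rw [if_neg hcond, hf k]
      dsimp only
      rw [hf (T + k)]
      dsimp only
      have ihh := ih (k + 1) (by omega) (by omega)
      rw [show T + (k + 1) = (T + k) + 1 from by omega] at ihh
      rw [show ((k : Int) + 1) = ((k + 1 : Nat) : Int) from by omega]
      exact ihh

theorem floyd_lam_run (adj_map : List (Int × List Int)) (f : String → String) (x0 : String)
    (mu lam : Nat) (hlam1 : 1 ≤ lam)
    (hf : ∀ k, next_state_alt (iterSeq f x0 k) adj_map = some (f (iterSeq f x0 k)))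
    (hleq : iterSeq f x0 (mu + lam) = iterSeq f x0 mu)
    (hlmin : ∀ l, 1 ≤ l → l < lam → iterSeq f x0 (mu + l) ≠ iterSeq f x0 mu) :
    ∀ fuel l, 1 ≤ l → l ≤ lam → lam < l + fuel →
      floyd_lam adj_map (iterSeq f x0 mu) fuel (iterSeq f x0 (mu + l)) (l : Int) =
        some (lam : Int) := by
  intro fuel
  induction fuel with
  | zero => intro l h1 h2 h3; exact absurd h2 (by omega)
  | succ fuel ih =>
    intro l hl1 hl2 hlam
    simp only [floyd_lam]
    by_cases hll : l = lam
    · subst hll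
      rw [if_pos hleq]
    · have hcond : iterSeq f x0 (mu + l) ≠ iterSeq f x0 mu := hlmin l hl1 (by omega)
      rw [if_neg hcond, hf (mu + l)]
      dsimp only
      have ihh := ih (l + 1) (by omega) (by omega) (by omega)
      rw [show ((l : Int) + 1) = ((l + 1 : Nat) : Int) from by omega]
      exact ihh

-- ===== VERDICT (by name: the statement is the Claim_ definition above) =====
theorem calculate_simulation_cycle_spec : Claim_equal_calculate_simulation_cycle := by
  unfold Claim_equal_calculate_simulation_cycle
  intro state adj_map _hDom hPre
  unfold Spec_calculate_simulation_cycle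
  set n := state.toList.length with hn
  set f : String → String := fun s => (next_state s adj_map).getD s with hfdef
  set x0 := state with hx0
  have hstep : ∀ s : String, s.toList.length = n →
      next_state s adj_map = some (f s) ∧ (f s).toList.length = n ∧
      ∀ c ∈ (f s).toList, c = '.' ∨ c = '|' ∨ c = '#' := by
    intro s hs
    obtain ⟨s', h1, h2, h3⟩ := next_state_some state adj_map hPre s hs
    have hfs : f s = s' := by rw [hfdef]; dsimp only; rw [h1]; rfl
    rw [hfs]
    exact ⟨h1, h2, h3⟩
  have hlen : ∀ k, (iterSeq f x0 k).toList.length = n := by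
    intro k
    induction k with
    | zero => rfl
    | succ k ih => exact (hstep _ ih).2.1
  have hf : ∀ k, next_state (iterSeq f x0 k) adj_map = some (f (iterSeq f x0 k)) :=
    fun k => (hstep _ (hlen k)).1
  have hfalt : ∀ k, next_state_alt (iterSeq f x0 k) adj_map = some (f (iterSeq f x0 k)) :=
    fun k => (next_state_alt_eq _ _).trans (hf k)
  have halpha : ∀ k, ∀ c ∈ (iterSeq f x0 (k + 1)).toList, c = '.' ∨ c = '|' ∨ c = '#' :=
    fun k => (hstep _ (hlen k)).2.2
  -- pigeonhole: a repeat exists among the first 3^n + 1 minutes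
  have hrep : ∃ i j, i < j ∧ j ≤ 3 ^ n + 1 ∧ iterSeq f x0 i = iterSeq f x0 j := by
    have hcard : (Finset.range (3 ^ n + 1)).card * 1 < (Finset.range (3 ^ n)).card * 2 → True := fun _ => trivial
    have hmaps : ∀ k ∈ Finset.range (3 ^ n + 1),
        stateCode (iterSeq f x0 (k + 1)).toList ∈ Finset.range (3 ^ n) := by
      intro k _
      have h := stateCode_lt (iterSeq f x0 (k + 1)).toList
      rw [hlen] at h
      exact Finset.mem_range.mpr h
    obtain ⟨a, ha, b, hb, hne, heqc⟩ :=
      Finset.exists_ne_map_eq_of_card_lt_of_maps_to (by simp) hmaps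
    have heqs : iterSeq f x0 (a + 1) = iterSeq f x0 (b + 1) :=
      String.toList_inj.mp (stateCode_inj _ _ (by rw [hlen, hlen]) (halpha a) (halpha b) heqc)
    simp only [Finset.mem_range] at ha hb
    rcases Nat.lt_or_ge a b with h | h
    · exact ⟨a + 1, b + 1, by omega, by omega, heqs⟩
    · exact ⟨b + 1, a + 1, by omega, by omega, heqs.symm⟩
  obtain ⟨i0, j0, hij, hjN, heq0⟩ := hrep
  -- r = the first repeat minute
  letI : DecidablePred (fun m => ∃ j, j < m ∧ iterSeq f x0 j = iterSeq f x0 m) :=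
    fun m => inferInstance
  have hexP : ∃ m, ∃ j, j < m ∧ iterSeq f x0 j = iterSeq f x0 m := ⟨j0, i0, hij, heq0⟩
  set r := Nat.find hexP with hrdef
  obtain ⟨mu0, hmu0r, hmueq0⟩ := Nat.find_spec hexP
  have hrN : r ≤ 3 ^ n + 1 := le_trans (Nat.find_min' hexP ⟨i0, hij, heq0⟩) hjN
  have hinj : ∀ i j, i < j → j < r → iterSeq f x0 i ≠ iterSeq f x0 j := by
    intro i j h1 h2 hne
    exact Nat.find_min hexP h2 ⟨i, h1, hne⟩
  have hrmin : ∀ b j, j < b → iterSeq f x0 j = iterSeq f x0 b → r ≤ b :=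
    fun b j h1 h2 => Nat.find_min' hexP ⟨j, h1, h2⟩
  -- mu = the first minute whose state recurs at minute r
  letI : DecidablePred (fun j => j < r ∧ iterSeq f x0 j = iterSeq f x0 r) :=
    fun j => inferInstance
  have hexQ : ∃ j, j < r ∧ iterSeq f x0 j = iterSeq f x0 r := ⟨mu0, hmu0r, hmueq0⟩
  set mu := Nat.find hexQ with hmudef
  have hmu := Nat.find_spec hexQ
  have hmur : mu < r := hmu.1
  have heqm : iterSeq f x0 mu = iterSeq f x0 r := hmu.2
  have hlo : ∀ j < mu, iterSeq f x0 j ≠ iterSeq f x0 r := by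
    intro j hj hje
    exact Nat.find_min hexQ hj ⟨by omega, hje⟩
  set lam := r - mu with hlamdef
  have hlam1 : 1 ≤ lam := by omega
  have hkey := iter_key f x0 r mu hmur heqm hinj hrmin
  -- T = the minute the tortoise and the hare first meet
  obtain ⟨t0, ht01, ht0r, ht0eq⟩ := iter_meet_exists f x0 r mu hmur heqm
  letI : DecidablePred (fun t => 1 ≤ t ∧ iterSeq f x0 t = iterSeq f x0 (2 * t)) :=
    fun t => inferInstance
  have hexT : ∃ t, 1 ≤ t ∧ iterSeq f x0 t = iterSeq f x0 (2 * t) := ⟨t0, ht01, ht0eq⟩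
  set T := Nat.find hexT with hTdef
  have hT := Nat.find_spec hexT
  have hT1 : 1 ≤ T := hT.1
  have hTeq := hT.2
  have hTle : T ≤ r := le_trans (Nat.find_le ⟨ht01, ht0eq⟩) ht0r
  have hTmin : ∀ t, 1 ≤ t → t < T → iterSeq f x0 t ≠ iterSeq f x0 (2 * t) := by
    intro t h1 h2 hje
    exact Nat.find_min hexT h2 ⟨h1, hje⟩
  have hTprop := hkey T (2 * T) (by omega) hTeq
  have hmuT : mu ≤ T := hTprop.1
  have hdvd : lam ∣ T := by
    have h := hTprop.2
    rw [show 2 * T - T = T from by omega] at h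
    exact h
  -- phase-2 facts
  have hmuTeq : iterSeq f x0 (T + mu) = iterSeq f x0 mu := by
    obtain ⟨m, hm⟩ := hdvd
    have h := iter_perm f x0 r mu hmur heqm m mu (le_refl mu)
    rw [show mu + m * (r - mu) = T + mu from by rw [hm]; ring] at h
    exact h
  have hltmu : ∀ k < mu, iterSeq f x0 k ≠ iterSeq f x0 (T + k) := by
    intro k hk hje
    have h := hkey k (T + k) (by omega) hje
    omega
  -- phase-3 facts
  have hleq : iterSeq f x0 (mu + lam) = iterSeq f x0 mu := by
    rw [show mu + lam = r from by omega]
    exact heqm.symm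
  have hlmin : ∀ l, 1 ≤ l → l < lam → iterSeq f x0 (mu + l) ≠ iterSeq f x0 mu := by
    intro l h1 h2 hje
    have h3 := hkey mu (mu + l) (by omega) hje.symm
    have h4 : lam ∣ l := by
      have h := h3.2
      rw [show mu + l - mu = l from by omega] at h
      exact h
    have := Nat.le_of_dvd (by omega) h4
    omega
  -- A's loop returns (mu, r)
  have hA : calculate_simulation_cycle state adj_map = ((mu : Int), (r : Int)) := by
    have h := cache_loop_run adj_map f x0 r mu hmur hf heqm hinj hlo (3 ^ n + 2) 0
      (by omega) (by omega)
    exact h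
  -- B's three phases return (mu, mu + lam)
  have hB : calculate_simulation_cycle_alt state adj_map = ((mu : Int), (mu : Int) + (lam : Int)) := by
    unfold calculate_simulation_cycle_alt
    have h0 : next_state_alt state adj_map = some (iterSeq f x0 1) := hfalt 0
    rw [h0]
    dsimp only
    have h1 : next_state_alt (iterSeq f x0 1) adj_map = some (iterSeq f x0 2) := hfalt 1
    rw [h1]
    dsimp only
    have hmeet : floyd_meet adj_map (3 ^ n + 2) (iterSeq f x0 1) (iterSeq f x0 2) =
        some (iterSeq f x0 T) := by
      have h := floyd_meet_run adj_map f x0 T hT1 hfalt hTeq hTmin (3 ^ n + 2) 0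
        (by omega) (by omega)
      norm_num at h
      exact h
    rw [hmeet]
    dsimp only
    have hmu_run : floyd_mu adj_map (3 ^ n + 2) state (iterSeq f x0 T) 0 =
        some (iterSeq f x0 mu, (mu : Int)) := by
      have h := floyd_mu_run adj_map f x0 T mu hfalt hmuTeq hltmu (3 ^ n + 2) 0
        (by omega) (by omega)
      rw [show T + 0 = T from by omega] at h
      exact h
    rw [hmu_run]
    dsimp only
    have hp1 : next_state_alt (iterSeq f x0 mu) adj_map = some (iterSeq f x0 (mu + 1)) := hfalt mu
    rw [hp1]
    dsimp only
    have hlam_run : floyd_lam adj_map (iterSeq f x0 mu) (3 ^ n + 2) (iterSeq f x0 (mu + 1)) 1 =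
        some (lam : Int) := by
      have h := floyd_lam_run adj_map f x0 mu lam hlam1 hfalt hleq hlmin (3 ^ n + 2) 1
        (le_refl 1) (by omega) (by omega)
      norm_num at h
      exact h
    rw [hlam_run]
  rw [hA, hB]
  rw [show (r : Int) = (mu : Int) + (lam : Int) from by omega]
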